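-- pv_equiv track=rewrite | github.com/coolMissile/operation-code | cvrp/classic/sweep.py | without_empty_routes
-- ===== SOURCE A (Python) =====
-- def without_empty_routes(sol):
--     """移除空路径"""
--     result = []
--     i = 0
--     while i < len(sol):
--         if i+1 < len(sol) and sol[i] == 0 and sol[i+1] == 0:
--             i += 1
--         else:
--             result.append(sol[i])
--         i += 1
--     return result
-- ===== SOURCE B (Python) =====
-- def without_empty_routes(sol):
--     """移除空路径 — stack form: cancel a zero against a trailing zero (look-back) instead of look-ahead pairing."""
--     result = []
--     for x in sol:
--         if x == 0 and result and result[-1] == 0: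
--             result.pop()
--         else:
--             result.append(x)
--     return result
-- ===== Notes on version B (the rewrite author's own statement) =====
-- stated objective: alternative
-- what changed: Replaces A's index-based look-ahead pairing (skip i and i+1 when both are zero) with a single for-loop over elements maintaining a stack that pops a trailing zero when another zero arrives (look-back cancellation).
import Mathlib
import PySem

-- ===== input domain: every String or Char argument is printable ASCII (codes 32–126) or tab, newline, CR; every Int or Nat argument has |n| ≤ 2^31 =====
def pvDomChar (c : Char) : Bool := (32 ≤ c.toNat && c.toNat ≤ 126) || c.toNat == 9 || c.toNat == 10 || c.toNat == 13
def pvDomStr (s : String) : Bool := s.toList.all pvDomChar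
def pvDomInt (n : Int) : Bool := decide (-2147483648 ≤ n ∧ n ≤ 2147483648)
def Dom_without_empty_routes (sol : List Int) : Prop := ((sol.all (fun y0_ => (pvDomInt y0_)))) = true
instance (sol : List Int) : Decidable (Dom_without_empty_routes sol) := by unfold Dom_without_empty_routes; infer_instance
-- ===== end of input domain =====

-- B replaces A's index look-ahead pairing of consecutive zeros with a stack that
-- cancels a zero against a trailing zero (look-back); same O(n) cost, different decomposition.


-- ===== PORT A =====
-- while-loop of A: index i, look-ahead at i+1, accumulator `result`
def without_empty_routes_go (sol : List Int) (i : Nat) (result : List Int) : List Int :=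
  if h : i < sol.length then
    if i + 1 < sol.length ∧ sol[i] = 0 ∧ sol.getD (i+1) 0 = 0 then
      without_empty_routes_go sol (i + 2) result
    else
      without_empty_routes_go sol (i + 1) (result ++ [sol[i]])
  else result
termination_by sol.length - i

def without_empty_routes (sol : List Int) : List Int :=
  without_empty_routes_go sol 0 []

-- ===== PORT B =====
-- stack step: pop the trailing zero when a zero arrives, else push
def without_empty_routes_alt_step (result : List Int) (x : Int) : List Int :=
  if x = 0 ∧ result.getLast? = some 0 then result.dropLast else result ++ [x]

def without_empty_routes_alt (sol : List Int) : List Int :=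
  sol.foldl without_empty_routes_alt_step []

-- ===== PRECONDITION & SPEC =====
def Spec_without_empty_routes (sol : List Int) (out : List Int) : Prop := out = without_empty_routes_alt sol
instance (sol : List Int) (out : List Int) : Decidable (Spec_without_empty_routes sol out) := by unfold Spec_without_empty_routes; infer_instance

-- ===== CLAIM (what is proved, stated in full; the proofs are below) =====
def Claim_equal_without_empty_routes : Prop := ∀ (sol : List Int), Dom_without_empty_routes sol → Spec_without_empty_routes sol (without_empty_routes sol)

-- ===== LEMMAS AND PROOFS =====

-- reference function: the result both ports compute
def werf : List Int → List Int
  | [] => []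
  | [x] => [x]
  | x :: y :: rest => if x = 0 ∧ y = 0 then werf rest else x :: werf (y :: rest)

theorem go_eq_werf (sol : List Int) (i : Nat) (result : List Int) :
    without_empty_routes_go sol i result = result ++ werf (sol.drop i) := by
  induction' hn : sol.length - i using Nat.strong_induction_on with n ih generalizing i result
  rw [without_empty_routes_go]
  by_cases h : i < sol.length
  · have hd : sol.drop i = sol[i] :: sol.drop (i+1) := List.drop_eq_getElem_cons h
    simp only [dif_pos h]
    by_cases h2 : i + 1 < sol.length
    · have hd2 : sol.drop (i+1) = sol[i+1] :: sol.drop (i+2) := List.drop_eq_getElem_cons h2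
      have hg : sol.getD (i+1) 0 = sol[i+1] := List.getD_eq_getElem sol 0 h2
      by_cases hz : sol[i] = 0 ∧ sol[i+1] = 0
      · rw [if_pos ⟨h2, hz.1, by rw [hg]; exact hz.2⟩,
          ih (sol.length - (i+2)) (by omega) (i+2) result rfl, hd, hd2, werf]
        simp [hz.1, hz.2]
      · rw [if_neg (by rw [hg]; tauto),
          ih (sol.length - (i+1)) (by omega) (i+1) (result ++ [sol[i]]) rfl, hd, hd2, werf]
        have : ¬ (sol[i] = 0 ∧ sol[i+1] = 0) := hz
        simp [this]
    · have hlast : sol.drop (i+1) = [] := List.drop_eq_nil_of_le (by omega)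
      rw [if_neg (by omega),
        ih (sol.length - (i+1)) (by omega) (i+1) (result ++ [sol[i]]) rfl, hd, hlast, werf]
      simp [werf]
  · simp only [dif_neg h]
    rw [List.drop_eq_nil_of_le (by omega), werf]
    simp

theorem foldl_step_eq_werf (l : List Int) (acc : List Int) (hacc : acc.getLast? ≠ some 0) :
    l.foldl without_empty_routes_alt_step acc = acc ++ werf l := by
  induction' hn : l.length using Nat.strong_induction_on with n ih generalizing l acc
  match l with
  | [] => simp [werf]
  | [x] =>
    by_cases hx : x = 0
    · simp [werf, without_empty_routes_alt_step, hx, hacc]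
    · simp [werf, without_empty_routes_alt_step, hx]
  | x :: y :: rest =>
    have hlen : rest.length + 1 + 1 = n := by simpa using hn
    by_cases hz : x = 0 ∧ y = 0
    · have s1 : without_empty_routes_alt_step acc x = acc ++ [x] := by
        simp [without_empty_routes_alt_step, hacc]
      have s2 : without_empty_routes_alt_step (acc ++ [x]) y = acc := by
        simp [without_empty_routes_alt_step, hz.1, hz.2]
      rw [List.foldl_cons, s1, List.foldl_cons, s2,
        ih rest.length (by omega) rest acc hacc rfl, werf, if_pos hz]
    · have s1 : without_empty_routes_alt_step acc x = acc ++ [x] := by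
        by_cases hx : x = 0
        · simp [without_empty_routes_alt_step, hx, hacc]
        · simp [without_empty_routes_alt_step, hx]
      by_cases hx : x = 0
      · -- then y ≠ 0, so the next step pushes y and the new accumulator ends in y ≠ 0
        have hy : y ≠ 0 := by tauto
        have s2 : without_empty_routes_alt_step (acc ++ [x]) y = acc ++ [x] ++ [y] := by
          simp [without_empty_routes_alt_step, hy]
        rw [List.foldl_cons, s1, List.foldl_cons, s2,
          ih rest.length (by omega) rest (acc ++ [x] ++ [y]) (by simp [hy]) rfl,
          werf, if_neg hz]
        have : werf (y :: rest) = y :: werf rest := by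
          match rest with
          | [] => rfl
          | z :: r => rw [werf]; simp [hy]
        simp [this]
      · rw [List.foldl_cons, s1,
          ih (y :: rest).length (by simp only [List.length_cons]; omega) (y :: rest)
            (acc ++ [x]) (by simp [hx]) rfl, werf, if_neg hz]
        simp

-- ===== VERDICT (by name: the statement is the Claim_ definition above) =====
theorem without_empty_routes_spec : Claim_equal_without_empty_routes := by
  intro sol _
  unfold Spec_without_empty_routes without_empty_routes without_empty_routes_alt
  rw [go_eq_werf, foldl_step_eq_werf sol [] (by simp)]
  simp
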